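-- pv_equiv track=rewrite | github.com/Scirtor/advanced-programming-env | Week2/ptask11.py | longest_n_and_replace_exclamations
-- ===== SOURCE A (Python) =====
-- def longest_n_and_replace_exclamations(s):
--     max_n = current = 0
--     for ch in s:
--         if ch == "n":
--             current += 1
--             max_n = max(max_n, current)
--         else:
--             current = 0
--     return s.replace("!", "."), max_n
-- ===== SOURCE B (Python) =====
-- def longest_n_and_replace_exclamations(s):
--     # collect the lengths of all maximal runs of 'n', then reduce with max
--     runs = []
--     i = 0
--     while i < len(s):
--         if s[i] == "n":
--             j = i
--             while j < len(s) and s[j] == "n":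
--                 j += 1
--             runs.append(j - i)
--             i = j
--         else:
--             i += 1
--     return s.replace("!", "."), max(runs, default=0)
-- ===== Notes on version B (the rewrite author's own statement) =====
-- stated objective: alternative
-- what changed: Replaces the running-counter-with-max single pass by extracting the list of maximal 'n'-run lengths and reducing it with max (default 0); the replace('!','.') part is unchanged.
import Mathlib
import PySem

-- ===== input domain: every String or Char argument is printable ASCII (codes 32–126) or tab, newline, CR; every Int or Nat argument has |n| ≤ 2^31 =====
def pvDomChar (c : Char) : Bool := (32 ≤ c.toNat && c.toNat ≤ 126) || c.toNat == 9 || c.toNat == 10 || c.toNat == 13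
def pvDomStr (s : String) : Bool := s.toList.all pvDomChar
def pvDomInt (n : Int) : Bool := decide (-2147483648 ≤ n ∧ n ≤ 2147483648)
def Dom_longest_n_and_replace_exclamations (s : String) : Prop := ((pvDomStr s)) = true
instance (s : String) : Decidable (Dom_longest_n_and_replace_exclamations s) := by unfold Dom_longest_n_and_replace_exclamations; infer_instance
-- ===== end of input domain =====

-- B builds the list of maximal 'n'-run lengths and reduces it with max, instead of A's running counter; same cost.

-- ===== PORT A =====
def longest_n_and_replace_exclamations (s : String) : String × Int :=
  -- for ch in s: if ch == 'n': current += 1; max_n = max(max_n, current) else: current = 0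
  let r := s.toList.foldl
    (fun (st : Int × Int) ch =>
      if ch = 'n' then (max st.1 (st.2 + 1), st.2 + 1) else (st.1, 0))
    (0, 0)
  (PySem.Str.replace s "!" ".", r.1)

-- ===== PORT B =====
-- lengths of the maximal runs of 'n' (B's while-loop: scan, inner scan over the run, skip past it)
def pvRuns : List Char → List Int
  | [] => []
  | c :: rest =>
    if c = 'n' then
      ((1 + (rest.takeWhile (fun ch => ch = 'n')).length : Int))
        :: pvRuns (rest.dropWhile (fun ch => ch = 'n'))
    else
      pvRuns rest
termination_by l => l.length
decreasing_by
  · exact Nat.lt_succ_of_le (List.length_dropWhile_le _ _)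
  · exact Nat.lt_succ_self _

def longest_n_and_replace_exclamations_alt (s : String) : String × Int :=
  -- max(runs, default=0)
  (PySem.Str.replace s "!" ".", (pvRuns s.toList).foldl max 0)

-- ===== PRECONDITION & SPEC =====
def Spec_longest_n_and_replace_exclamations (s : String) (out : String × Int) : Prop := out = longest_n_and_replace_exclamations_alt s
instance (s : String) (out : String × Int) : Decidable (Spec_longest_n_and_replace_exclamations s out) := by unfold Spec_longest_n_and_replace_exclamations; infer_instance

-- ===== CLAIM (what is proved, stated in full; the proofs are below) =====
def Claim_equal_longest_n_and_replace_exclamations : Prop := ∀ (s : String), Dom_longest_n_and_replace_exclamations s → Spec_longest_n_and_replace_exclamations s (longest_n_and_replace_exclamations s)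

-- ===== LEMMAS AND PROOFS =====

theorem pv_foldl_max_sup (xs : List Int) : ∀ (a b : Int),
    xs.foldl max (a ⊔ b) = a ⊔ xs.foldl max b := by
  induction xs with
  | nil => intro a b; simp
  | cons x xs ih =>
    intro a b
    simpa [List.foldl, max_assoc] using ih a (b ⊔ x)

theorem pv_le_foldl_max (xs : List Int) : ∀ (a : Int), a ≤ xs.foldl max a := by
  induction xs with
  | nil => intro a; simp
  | cons x xs ih =>
    intro a
    exact le_trans (le_max_left a x) (ih (a ⊔ x))

-- pulling the head out of the fold
theorem pv_foldl_max_cons (x : Int) (xs : List Int)  :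
    (x :: xs).foldl max 0 = x ⊔ xs.foldl max 0 := by
  calc (x :: xs).foldl max 0 = xs.foldl max (0 ⊔ x) := by simp [List.foldl]
    _ = xs.foldl max (x ⊔ 0) := by rw [sup_comm]
    _ = x ⊔ xs.foldl max 0 := pv_foldl_max_sup xs x 0

-- the max over all runs equals (leading-run length) ⊔ (max over runs after the leading run)
theorem pv_runsMax_eq (l : List Char) :
    (pvRuns l).foldl max 0 =
      ((l.takeWhile (fun ch => ch = 'n')).length : Int)
        ⊔ (pvRuns (l.dropWhile (fun ch => ch = 'n'))).foldl max 0 := by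
  cases l with
  | nil => simp [pvRuns]
  | cons c rest =>
    by_cases h : c = 'n'
    · rw [List.takeWhile_cons_of_pos (by simp [h]), List.dropWhile_cons_of_pos (by simp [h]),
        pvRuns, if_pos h, pv_foldl_max_cons _ _]
      generalize (pvRuns (rest.dropWhile (fun ch => ch = 'n'))).foldl max 0 = R
      have hc : ((c :: rest.takeWhile (fun ch => ch = 'n')).length : Int)
          = 1 + ((rest.takeWhile (fun ch => ch = 'n')).length : Int) := by
        push_cast [List.length_cons]; ring
      rw [hc]
    · rw [List.takeWhile_cons_of_neg (by simp [h]), List.dropWhile_cons_of_neg (by simp [h]),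
        pvRuns, if_neg h]
      simp only [List.length_nil, Nat.cast_zero]
      exact (sup_eq_right.mpr (pv_le_foldl_max _ 0)).symm

-- invariant of A's loop
theorem pv_loopA (l : List Char) : ∀ (m c : Int), 0 ≤ c → c ≤ m →
    (l.foldl (fun (st : Int × Int) ch =>
        if ch = 'n' then (max st.1 (st.2 + 1), st.2 + 1) else (st.1, 0)) (m, c)).1
      = m ⊔ (c + ((l.takeWhile (fun ch => ch = 'n')).length : Int))
          ⊔ (pvRuns (l.dropWhile (fun ch => ch = 'n'))).foldl max 0 := by
  induction l with
  | nil =>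
    intro m c h0 hm
    simp [pvRuns]
    omega
  | cons ch rest ih =>
    intro m c h0 hm
    by_cases h : ch = 'n'
    · rw [List.foldl_cons, if_pos h, List.takeWhile_cons_of_pos (by simp [h]),
        List.dropWhile_cons_of_pos (by simp [h]),
        ih (m ⊔ (c + 1)) (c + 1) (by omega) (le_max_right _ _)]
      push_cast [List.length_cons]
      have hL : (0 : Int) ≤ ((rest.takeWhile (fun ch => ch = 'n')).length : Int) := by positivity
      generalize (pvRuns (rest.dropWhile (fun ch => ch = 'n'))).foldl max 0 = R
      generalize ((rest.takeWhile (fun ch => ch = 'n')).length : Int) = L at hL ⊢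
      omega
    · rw [List.foldl_cons, if_neg h, List.takeWhile_cons_of_neg (by simp [h]),
        List.dropWhile_cons_of_neg (by simp [h]),
        ih m 0 le_rfl (by omega), pvRuns, if_neg h, pv_runsMax_eq rest]
      have hR : (0 : Int) ≤ (pvRuns (rest.dropWhile (fun ch => ch = 'n'))).foldl max 0 :=
        pv_le_foldl_max _ 0
      generalize (pvRuns (rest.dropWhile (fun ch => ch = 'n'))).foldl max 0 = R at *
      simp only [List.length_nil, Nat.cast_zero, zero_add, add_zero]
      generalize ((rest.takeWhile (fun ch => ch = 'n')).length : Int) = L at *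
      omega

-- ===== VERDICT (by name: the statement is the Claim_ definition above) =====
theorem longest_n_and_replace_exclamations_spec : Claim_equal_longest_n_and_replace_exclamations := by
  intro s _
  unfold Spec_longest_n_and_replace_exclamations longest_n_and_replace_exclamations
    longest_n_and_replace_exclamations_alt
  rw [Prod.mk.injEq]
  refine ⟨rfl, ?_⟩
  rw [pv_loopA s.toList 0 0 le_rfl le_rfl, pv_runsMax_eq s.toList]
  have hR : (0 : Int) ≤ (pvRuns (s.toList.dropWhile (fun ch => ch = 'n'))).foldl max 0 :=
    pv_le_foldl_max _ 0
  generalize (pvRuns (s.toList.dropWhile (fun ch => ch = 'n'))).foldl max 0 = R at *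
  generalize ((s.toList.takeWhile (fun ch => ch = 'n')).length : Int) = L
  omega
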